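-- pv_equiv track=rewrite | github.com/haomingdouranggouqil/creat-a-simulated-computer | 高级语言/字节码/语法分析器/字元化/JackTokenizer.py | split2
-- ===== SOURCE A (Python) =====
-- sym = ['{', '}', '(', ')', '[', ']', '.', ',', ';', '+', '-', '*', '/', '&', '|', '<', '>', '=', '~']
--
-- def split2(split_list1):
--     split_list2 =[]
--     for i in split_list1:
--         tem = []
--         t=0
--         for j in range(len(i)):
--             if i[j] in sym:
--                 tem.append(i[t:j])
--                 tem.append(i[j])
--                 t=j+1
--         tem.append(i[t:])
--         split_list2+=tem
--
--     end =[]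
--     for i in split_list2:
--         if len(i) == 0:
--             pass
--         else:
--             end.append(i)
--     return end
-- ===== SOURCE B (Python) =====
-- SYM = set('{}()[].,;+-*/&|<>=~')
--
-- def split2(split_list1):
--     end = []
--     for s in split_list1:
--         buf = []
--         for c in s:
--             if c in SYM:
--                 if buf:
--                     end.append(''.join(buf))
--                     buf = []
--                 end.append(c)
--             else:
--                 buf.append(c)
--         if buf:
--             end.append(''.join(buf))
--     return end
-- ===== Notes on version B (the rewrite author's own statement) =====
-- stated objective: faster
-- what changed: B makes a single character scan per string with an explicit buffer, emitting non-empty tokens directly, instead of A's index loop that takes a slice at every symbol, collects empty fragments and filters them out in a second pass.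
import Mathlib
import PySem

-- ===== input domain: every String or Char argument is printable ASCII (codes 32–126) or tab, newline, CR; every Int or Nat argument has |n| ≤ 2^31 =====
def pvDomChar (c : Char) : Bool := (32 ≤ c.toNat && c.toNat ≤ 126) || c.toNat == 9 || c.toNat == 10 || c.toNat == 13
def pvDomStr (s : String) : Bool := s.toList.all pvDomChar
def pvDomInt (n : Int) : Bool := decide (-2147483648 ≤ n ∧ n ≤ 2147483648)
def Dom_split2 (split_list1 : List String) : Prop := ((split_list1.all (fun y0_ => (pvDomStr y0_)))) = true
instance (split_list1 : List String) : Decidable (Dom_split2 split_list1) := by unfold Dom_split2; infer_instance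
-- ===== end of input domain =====

-- B replaces A's slice-at-each-symbol index loop plus a second filtering pass by one
-- buffered character scan per string that emits non-empty tokens directly.

-- the 19 symbol characters (Python's `sym`, a list of 1-char strings, compared against single chars)
def symChars : List Char := ['{', '}', '(', ')', '[', ']', '.', ',', ';', '+', '-', '*', '/', '&', '|', '<', '>', '=', '~']

-- ===== PORT A =====
def split2 (split_list1 : List String) : List String :=
  let split_list2 := split_list1.foldl (fun split_list2 i =>
    let st := (PySem.List.pyRange 0 (PySem.Str.len i) 1).foldl
      (fun (st : List String × Int) j =>
        match PySem.Str.pyGet? i j with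
        | some c =>
          if c ∈ symChars then
            (st.1 ++ [PySem.Str.slice i (some st.2) (some j), String.ofList [c]], j + 1)
          else st
        | none => st) ([], 0)
    split_list2 ++ (st.1 ++ [PySem.Str.slice i (some st.2) none])) []
  split_list2.foldl (fun e i => if PySem.Str.len i == 0 then e else e ++ [i]) []

-- ===== PORT B =====
def split2_alt (split_list1 : List String) : List String :=
  split_list1.foldl (fun e s =>
    let st := s.toList.foldl (fun (st : List String × List Char) c =>
      if c ∈ symChars then
        ((if st.2.isEmpty then st.1 else st.1 ++ [String.ofList st.2]) ++ [String.ofList [c]], [])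
      else (st.1, st.2 ++ [c])) (e, [])
    if st.2.isEmpty then st.1 else st.1 ++ [String.ofList st.2]) []

-- ===== PRECONDITION & SPEC =====
def Spec_split2 (split_list1 : List String) (out : List String) : Prop := out = split2_alt split_list1
instance (split_list1 : List String) (out : List String) : Decidable (Spec_split2 split_list1 out) := by unfold Spec_split2; infer_instance

-- ===== CLAIM (what is proved, stated in full; the proofs are below) =====
def Claim_equal_split2 : Prop := ∀ (split_list1 : List String), Dom_split2 split_list1 → Spec_split2 split_list1 (split2 split_list1)

-- ===== LEMMAS AND PROOFS =====

-- the common tokenizer both ports compute: pending buffer `buf`, remaining characters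
def tok : List Char → List Char → List String
  | buf, [] => if buf.isEmpty then [] else [String.ofList buf]
  | buf, c :: cs =>
    if c ∈ symChars then
      (if buf.isEmpty then [] else [String.ofList buf]) ++ String.ofList [c] :: tok [] cs
    else tok (buf ++ [c]) cs

-- B's inner fold computes `tok`
theorem alt_inner (cs : List Char) : ∀ (out : List String) (buf : List Char),
    (let st := cs.foldl (fun (st : List String × List Char) c =>
      if c ∈ symChars then
        ((if st.2.isEmpty then st.1 else st.1 ++ [String.ofList st.2]) ++ [String.ofList [c]], [])
      else (st.1, st.2 ++ [c])) (out, buf)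
     if st.2.isEmpty then st.1 else st.1 ++ [String.ofList st.2])
    = out ++ tok buf cs := by
  induction cs with
  | nil => intro out buf; simp [tok]; split <;> simp
  | cons c cs ih =>
    intro out buf
    simp only [List.foldl_cons, tok]
    by_cases hc : c ∈ symChars
    · simp only [hc, if_pos]
      rw [ih]
      split <;> simp
    · simp only [hc, ite_false]
      rw [ih]

theorem split2_alt_eq (l : List String) :
    split2_alt l = l.foldl (fun e s => e ++ tok [] s.toList) [] := by
  unfold split2_alt
  congr 1
  funext e s
  exact alt_inner s.toList e []

def pvNE (i : String) : Bool := !(PySem.Str.len i == 0)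

theorem filter_fold (l : List String) : ∀ (e : List String),
    l.foldl (fun e i => if PySem.Str.len i == 0 then e else e ++ [i]) e = e ++ l.filter pvNE := by
  induction l with
  | nil => intro e; simp
  | cons x l ih =>
    intro e
    simp only [List.foldl_cons, List.filter_cons]
    by_cases h : (PySem.Str.len x == 0) = true
    · have hb : pvNE x = false := by unfold pvNE; rw [h]; rfl
      rw [if_pos h, ih, hb]
      simp
    · have hb : pvNE x = true := by unfold pvNE; rw [Bool.eq_false_iff.mpr h]; rfl
      rw [if_neg h, ih, hb]
      simp

theorem pvNE_ofList (l : List Char) : pvNE (String.ofList l) = !l.isEmpty := by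
  unfold pvNE
  rw [PySem.Str.len_eq, String.toList_ofList]
  cases l with
  | nil => decide
  | cons a as =>
    simp
    omega

-- A's inner loop invariant: at index k with segment start t, the filtered output-so-far
-- plus the remaining loop equals `tok` of the pending buffer over the remaining characters.
theorem a_inner (i : String) : ∀ (m k t : Nat) (acc : List String),
    k + m = i.toList.length → t ≤ k →
    ((((PySem.List.pyRange (k : Int) (PySem.Str.len i) 1).foldl
      (fun (st : List String × Int) j =>
        match PySem.Str.pyGet? i j with
        | some c =>
          if c ∈ symChars then
            (st.1 ++ [PySem.Str.slice i (some st.2) (some j), String.ofList [c]], j + 1)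
          else st
        | none => st) (acc, (t : Int))).1
      ++ [PySem.Str.slice i (some (((PySem.List.pyRange (k : Int) (PySem.Str.len i) 1).foldl
      (fun (st : List String × Int) j =>
        match PySem.Str.pyGet? i j with
        | some c =>
          if c ∈ symChars then
            (st.1 ++ [PySem.Str.slice i (some st.2) (some j), String.ofList [c]], j + 1)
          else st
        | none => st) (acc, (t : Int))).2)) none]).filter pvNE)
    = acc.filter pvNE ++ tok ((i.toList.drop t).take (k - t)) (i.toList.drop k) := by
  intro m
  induction m with
  | zero =>
    intro k t acc hk ht
    have hkl : k = i.toList.length := by omega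
    rw [PySem.Str.len_eq, PySem.List.pyRange_one_eq_nil (a := (k : Int)) (b := (i.toList.length : Int)) (by omega)]
    simp only [List.foldl_nil]
    have hdk : i.toList.drop k = [] := by simp [hkl]
    have hbuf : (i.toList.drop t).take (k - t) = i.toList.drop t := by
      apply List.take_of_length_le; rw [List.length_drop]; omega
    rw [hdk, hbuf]
    have hsl : PySem.Str.slice i (some (t : Int)) none = String.ofList (i.toList.drop t) := by
      unfold PySem.Str.slice
      rw [PySem.Chars.slice_eq_listSlice, PySem.List.slice_from_natCast]
    rw [hsl]
    simp only [tok, List.filter_append, List.filter_cons, List.filter_nil, pvNE_ofList]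
    cases (i.toList.drop t).isEmpty <;> simp
  | succ m ih =>
    intro k t acc hk ht
    have hkn : k < i.toList.length := by omega
    rw [PySem.Str.len_eq, PySem.List.pyRange_one_cons (a := (k : Int)) (b := (i.toList.length : Int)) (by exact_mod_cast hkn)]
    simp only [List.foldl_cons]
    have hget : PySem.Str.pyGet? i (k : Int) = some (i.toList[k]) := by
      rw [PySem.Str.pyGet?_natCast]; simp
    rw [hget]
    have hdrop : i.toList.drop k = i.toList[k] :: i.toList.drop (k + 1) :=
      List.drop_eq_getElem_cons hkn
    have hcast : ((k : Int) + 1) = ((k + 1 : Nat) : Int) := by push_cast; ring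
    by_cases hc : i.toList[k] ∈ symChars
    · simp only [hc, if_pos]
      have hsl : PySem.Str.slice i (some (t : Int)) (some (k : Int))
          = String.ofList ((i.toList.drop t).take (k - t)) := by
        unfold PySem.Str.slice
        rw [PySem.Chars.slice_eq_listSlice, PySem.List.slice_natCast]
      rw [hcast, ← PySem.Str.len_eq,
        ih (k + 1) (k + 1) (acc ++ [PySem.Str.slice i (some (t : Int)) (some (k : Int)), String.ofList [i.toList[k]]])
          (by omega) (le_refl _)]
      rw [hdrop]
      simp only [tok, hc, if_pos, Nat.sub_self, List.take_zero]
      rw [hsl]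
      simp only [List.filter_append, List.filter_cons, List.filter_nil, pvNE_ofList]
      cases ((i.toList.drop t).take (k - t)).isEmpty <;> simp
    · simp only [hc, ite_false]
      rw [hcast, ← PySem.Str.len_eq, ih (k + 1) t acc (by omega) (by omega)]
      rw [hdrop]
      simp only [tok, hc, ite_false]
      have hbuf : (i.toList.drop t).take (k + 1 - t)
          = (i.toList.drop t).take (k - t) ++ [i.toList[k]] := by
        have h1 : k + 1 - t = (k - t) + 1 := by omega
        rw [h1, List.take_add_one]
        have h2 : (i.toList.drop t)[k - t]? = some i.toList[k] := by
          rw [List.getElem?_drop]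
          have : t + (k - t) = k := by omega
          rw [this]; simp
        rw [h2]; rfl
      rw [hbuf]

-- the per-string block A appends to split_list2
def blockA (i : String) : List String :=
  let st := (PySem.List.pyRange 0 (PySem.Str.len i) 1).foldl
    (fun (st : List String × Int) j =>
      match PySem.Str.pyGet? i j with
      | some c =>
        if c ∈ symChars then
          (st.1 ++ [PySem.Str.slice i (some st.2) (some j), String.ofList [c]], j + 1)
        else st
      | none => st) ([], 0)
  st.1 ++ [PySem.Str.slice i (some st.2) none]

theorem blockA_filter (i : String) : (blockA i).filter pvNE = tok [] i.toList := by
  have h := a_inner i i.toList.length 0 0 [] (by omega) (Nat.le_refl 0)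
  simpa [blockA] using h

theorem fold_blocks (f g : String → List String) (h : ∀ s, (f s).filter pvNE = g s) :
    ∀ (l : List String) (a : List String),
    (l.foldl (fun a s => a ++ f s) a).filter pvNE = a.filter pvNE ++ l.flatMap g := by
  intro l
  induction l with
  | nil => intro a; simp
  | cons x l ih =>
    intro a
    simp only [List.foldl_cons, List.flatMap_cons]
    rw [ih, List.filter_append, h x, List.append_assoc]

theorem split2_eq (l : List String) :
    split2 l = l.foldl (fun e s => e ++ tok [] s.toList) [] := by
  unfold split2
  show (List.foldl (fun a s => a ++ blockA s) [] l).foldl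
      (fun e i => if PySem.Str.len i == 0 then e else e ++ [i]) []
    = l.foldl (fun e s => e ++ tok [] s.toList) []
  rw [filter_fold, fold_blocks blockA (fun s => tok [] s.toList) blockA_filter l []]
  rw [PySem.List.foldl_append_eq_flatMap (fun s => tok [] s.toList) l []]
  simp

-- ===== VERDICT (by name: the statement is the Claim_ definition above) =====
theorem split2_spec : Claim_equal_split2 := by
  intro l _
  unfold Spec_split2
  rw [split2_eq, split2_alt_eq]
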